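-- pv_equiv track=rewrite | github.com/MaximUshakov1/VK_Comunity | api_methods.py | groups_getMembers
-- ===== SOURCE A (Python) =====
-- def groups_getMembers(group_id, count, offset=0):
--     class_name = 'groups'
--     method_name = 'getMembers'
--     max_count_members = 1000
--
--     url_list = []
--
--     count_members_temp = count
--     offset_temp = offset
--     while count_members_temp > max_count_members:
--         options = ('"group_id":'+str(group_id) +
--                    ',"offset":'+str(offset_temp) +
--                    ',"count":'+str(max_count_members))
--         url = '%s.%s({%s})' % (class_name, method_name, options)
--         url_list.append(url)
--
--         offset_temp += max_count_members
--         count_members_temp -= max_count_members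
--     if count_members_temp > 0:
--         options = ('"group_id":'+str(group_id) +
--                    ',"offset":'+str(offset_temp) +
--                    ',"count":'+str(count_members_temp))
--         url = '%s.%s({%s})' % (class_name, method_name, options)
--         url_list.append(url)
--
--     return url_list
-- ===== SOURCE B (Python) =====
-- def groups_getMembers(group_id, count, offset=0):
--     if count <= 0:
--         return []
--     full, rem = divmod(count, 1000)
--     sizes = [1000] * full + ([rem] if rem else [])
--     return ['groups.getMembers({"group_id":%s,"offset":%s,"count":%s})'
--             % (group_id, offset + i * 1000, c)
--             for i, c in enumerate(sizes)]
-- ===== Notes on version B (the rewrite author's own statement) =====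
-- stated objective: simpler
-- what changed: Replaces the subtract-in-a-while-loop plus trailing remainder branch by direct arithmetic: divmod computes the chunk sizes, and one indexed comprehension formats every URL.
import Mathlib
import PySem

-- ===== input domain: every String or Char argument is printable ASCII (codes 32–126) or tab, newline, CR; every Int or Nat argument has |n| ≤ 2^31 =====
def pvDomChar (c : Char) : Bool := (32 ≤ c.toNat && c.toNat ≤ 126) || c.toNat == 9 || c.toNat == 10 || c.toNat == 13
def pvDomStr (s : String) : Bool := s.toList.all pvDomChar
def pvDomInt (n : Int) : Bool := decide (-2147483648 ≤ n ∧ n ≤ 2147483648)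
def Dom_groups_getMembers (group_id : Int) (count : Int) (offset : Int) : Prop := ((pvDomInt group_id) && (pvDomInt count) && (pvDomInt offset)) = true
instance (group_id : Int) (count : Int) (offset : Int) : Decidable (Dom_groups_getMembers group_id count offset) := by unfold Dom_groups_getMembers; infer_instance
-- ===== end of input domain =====

-- B replaces A's subtract-in-a-while-loop plus trailing remainder branch by divmod chunk
-- arithmetic and a single indexed comprehension (same cost; simpler).


-- ===== PORT A =====
-- the while loop, recursing on count_members_temp; acc is url_list
def pvALoop (group_id : Int) (count_members_temp : Int) (offset_temp : Int)
    (url_list : List String) : List String :=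
  if _h : count_members_temp > 1000 then
    pvALoop group_id (count_members_temp - 1000) (offset_temp + 1000)
      (url_list ++ ["groups" ++ "." ++ "getMembers" ++ "({" ++
        ("\"group_id\":" ++ PySem.Int.toStr group_id ++
         ",\"offset\":" ++ PySem.Int.toStr offset_temp ++
         ",\"count\":" ++ PySem.Int.toStr (1000 : Int)) ++ "})"])
  else if count_members_temp > 0 then
    url_list ++ ["groups" ++ "." ++ "getMembers" ++ "({" ++
      ("\"group_id\":" ++ PySem.Int.toStr group_id ++
       ",\"offset\":" ++ PySem.Int.toStr offset_temp ++
       ",\"count\":" ++ PySem.Int.toStr count_members_temp) ++ "})"]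
  else url_list
termination_by count_members_temp.toNat
decreasing_by omega

def groups_getMembers (group_id : Int) (count : Int) (offset : Int) : List String :=
  pvALoop group_id count offset []

-- ===== PORT B =====
-- the format string 'groups.getMembers({"group_id":%s,"offset":%s,"count":%s})'
def pvFmt (group_id : Int) (off : Int) (c : Int) : String :=
  "groups.getMembers({\"group_id\":" ++ PySem.Int.toStr group_id ++
  ",\"offset\":" ++ PySem.Int.toStr off ++
  ",\"count\":" ++ PySem.Int.toStr c ++ "})"

def groups_getMembers_alt (group_id : Int) (count : Int) (offset : Int) : List String :=
  if count ≤ 0 then []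
  else
    let full := PySem.Int.floordiv count 1000
    let rem := PySem.Int.mod count 1000
    let sizes := List.replicate full.toNat (1000 : Int) ++ (if rem ≠ 0 then [rem] else [])
    (PySem.List.enumerate sizes).map (fun ic => pvFmt group_id (offset + ic.1 * 1000) ic.2)

-- ===== PRECONDITION & SPEC =====
def Spec_groups_getMembers (group_id : Int) (count : Int) (offset : Int) (out : List String) : Prop := out = groups_getMembers_alt group_id count offset
instance (group_id : Int) (count : Int) (offset : Int) (out : List String) : Decidable (Spec_groups_getMembers group_id count offset out) := by unfold Spec_groups_getMembers; infer_instance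

-- ===== CLAIM (what is proved, stated in full; the proofs are below) =====
def Claim_equal_groups_getMembers : Prop := ∀ (group_id : Int) (count : Int) (offset : Int), Dom_groups_getMembers group_id count offset → Spec_groups_getMembers group_id count offset (groups_getMembers group_id count offset)

-- ===== LEMMAS AND PROOFS =====

-- A's literal-concatenation URL equals B's formatted URL
theorem pvUrl_eq (g o c : Int) :
    "groups" ++ "." ++ "getMembers" ++ "({" ++
      ("\"group_id\":" ++ PySem.Int.toStr g ++
       ",\"offset\":" ++ PySem.Int.toStr o ++
       ",\"count\":" ++ PySem.Int.toStr c) ++ "})" = pvFmt g o c := by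
  have hpre : ("groups" : String) ++ "." ++ "getMembers" ++ "({" ++ "\"group_id\":" =
      "groups.getMembers({\"group_id\":" := rfl
  simp only [pvFmt, ← String.append_assoc, hpre]

-- shifting the enumeration start by one is the same as shifting the offset by 1000
theorem pvShift (g o : Int) (xs : List Int) : ∀ s : Int,
    (PySem.List.enumerate xs (s+1)).map (fun ic => pvFmt g (o + ic.1 * 1000) ic.2) =
    (PySem.List.enumerate xs s).map (fun ic => pvFmt g ((o + 1000) + ic.1 * 1000) ic.2) := by
  induction xs with
  | nil => intro s; simp [PySem.List.enumerate_nil]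
  | cons x xs ih =>
      intro s
      simp only [PySem.List.enumerate_cons, List.map_cons, ih (s+1)]
      congr 2
      ring_nf

-- B satisfies the chunking recurrence
theorem pvAlt_step (g c o : Int) (h : c > 1000) :
    groups_getMembers_alt g c o = pvFmt g o 1000 :: groups_getMembers_alt g (c - 1000) (o + 1000) := by
  have hd : PySem.Int.floordiv c 1000 = c / 1000 := PySem.Int.floordiv_eq_ediv_of_pos (by omega)
  have hd' : PySem.Int.floordiv (c - 1000) 1000 = (c - 1000) / 1000 :=
    PySem.Int.floordiv_eq_ediv_of_pos (by omega)
  have hm : PySem.Int.mod c 1000 = c % 1000 := PySem.Int.mod_eq_emod_of_pos (by omega)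
  have hm' : PySem.Int.mod (c - 1000) 1000 = (c - 1000) % 1000 :=
    PySem.Int.mod_eq_emod_of_pos (by omega)
  have hmod : (c - 1000) % 1000 = c % 1000 := by omega
  have hdiv : (c / 1000).toNat = ((c - 1000) / 1000).toNat + 1 := by omega
  simp only [groups_getMembers_alt, hd, hd', hm, hm', hmod, hdiv,
    if_neg (by omega : ¬ c ≤ 0), if_neg (by omega : ¬ c - 1000 ≤ 0)]
  simp only [List.replicate_succ, List.cons_append, PySem.List.enumerate_cons, List.map_cons]
  congr 1
  · norm_num
  · simpa using pvShift g o _ 0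

-- B on the last chunk
theorem pvAlt_last (g c o : Int) (h0 : 0 < c) (h1 : c ≤ 1000) :
    groups_getMembers_alt g c o = [pvFmt g o c] := by
  have hd : PySem.Int.floordiv c 1000 = c / 1000 := PySem.Int.floordiv_eq_ediv_of_pos (by omega)
  have hm : PySem.Int.mod c 1000 = c % 1000 := PySem.Int.mod_eq_emod_of_pos (by omega)
  by_cases hc : c = 1000
  · subst hc
    simp [groups_getMembers_alt, PySem.List.enumerate_cons, PySem.List.enumerate_nil]
  · have hdv : c / 1000 = 0 := by omega
    have hmv : c % 1000 = c := by omega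
    simp only [groups_getMembers_alt, hd, hm, hdv, hmv, if_neg (show ¬ c ≤ 0 by omega),
      if_pos (show c ≠ 0 by omega), Int.toNat_zero, List.replicate_zero, List.nil_append]
    simp [PySem.List.enumerate_cons, PySem.List.enumerate_nil]

-- the loop invariant: pvALoop accumulates exactly B's list
theorem pvALoop_eq (g : Int) : ∀ n : Nat, ∀ c o : Int, ∀ acc : List String, c.toNat ≤ n →
    pvALoop g c o acc = acc ++ groups_getMembers_alt g c o := by
  intro n
  induction n with
  | zero =>
      intro c o acc hn
      rw [pvALoop, dif_neg (by omega), if_neg (by omega)]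
      simp [groups_getMembers_alt, if_pos (show c ≤ 0 by omega)]
  | succ n ih =>
      intro c o acc hn
      by_cases h : c > 1000
      · rw [pvALoop, dif_pos h, ih (c - 1000) (o + 1000) _ (by omega),
          pvAlt_step g c o h, pvUrl_eq]
        simp
      · rw [pvALoop, dif_neg h]
        by_cases h0 : c > 0
        · rw [if_pos h0, pvAlt_last g c o h0 (by omega), pvUrl_eq]
        · rw [if_neg h0]
          simp [groups_getMembers_alt, if_pos (show c ≤ 0 by omega)]

-- ===== VERDICT (by name: the statement is the Claim_ definition above) =====
theorem groups_getMembers_spec : Claim_equal_groups_getMembers := by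
  intro g c o _
  unfold Spec_groups_getMembers groups_getMembers
  simpa using pvALoop_eq g c.toNat c o [] (le_refl _)
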